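-- pv_equiv track=rewrite | github.com/kjimin0619/ps-practice | 백준/Bronze/8958. OX퀴즈/OX퀴즈.py | scoring
-- ===== SOURCE A (Python) =====
-- def scoring(s):
--     cn = 0
--     totalScore = 0
--     for score in s:
--         if score == "O" :
--             cn += 1
--         else :
--             cn = 0
--
--         totalScore += cn
--     return totalScore
-- ===== SOURCE B (Python) =====
-- def scoring(s):
--     total = 0
--     i, n = 0, len(s)
--     while i < n:
--         if s[i] == "O":
--             j = i
--             while j < n and s[j] == "O":
--                 j += 1
--             L = j - i
--             total += L * (L + 1) // 2
--             i = j
--         else: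
--             i += 1
--     return total
-- ===== Notes on version B (the rewrite author's own statement) =====
-- stated objective: alternative
-- what changed: Replaces the per-character streak accumulator with a run-scanning pass that jumps over each maximal run of 'O's and adds its closed-form triangular value L*(L+1)//2.
import Mathlib
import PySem

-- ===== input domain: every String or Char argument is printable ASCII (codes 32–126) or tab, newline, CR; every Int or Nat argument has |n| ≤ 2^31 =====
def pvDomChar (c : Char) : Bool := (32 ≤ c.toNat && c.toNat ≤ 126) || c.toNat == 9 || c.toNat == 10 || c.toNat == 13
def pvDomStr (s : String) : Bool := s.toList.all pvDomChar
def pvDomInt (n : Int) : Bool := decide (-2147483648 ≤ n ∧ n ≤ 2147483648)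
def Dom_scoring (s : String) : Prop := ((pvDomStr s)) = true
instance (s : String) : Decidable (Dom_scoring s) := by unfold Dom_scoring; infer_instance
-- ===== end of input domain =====

-- B replaces A's per-character streak accumulator with a run-scanning pass adding the
-- closed-form triangular value L*(L+1)/2 per maximal run of 'O's (alternative decomposition).


-- ===== PORT A =====
-- per-character fold carrying (current streak cn, running totalScore)
def scoringStep (st : Int × Int) (c : Char) : Int × Int :=
  if c == 'O' then (st.1 + 1, st.2 + (st.1 + 1)) else (0, st.2)

def scoring (s : String) : Int :=
  (s.toList.foldl scoringStep (0, 0)).2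

-- ===== PORT B =====
-- scan: skip a non-'O' char, or jump over a maximal run of 'O's and add L*(L+1)/2
def scoringRuns : List Char → Int
  | [] => 0
  | c :: cs =>
    if c == 'O' then
      let run := (c :: cs).takeWhile (· == 'O')
      let L : Int := run.length
      L * (L + 1) / 2 + scoringRuns ((c :: cs).dropWhile (· == 'O'))
    else
      scoringRuns cs
termination_by l => l.length
decreasing_by
  · simp_all [List.dropWhile]
    exact List.length_dropWhile_le _ _
  · simp

def scoring_alt (s : String) : Int := scoringRuns s.toList

-- ===== PRECONDITION & SPEC =====
def Spec_scoring (s : String) (out : Int) : Prop := out = scoring_alt s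
instance (s : String) (out : Int) : Decidable (Spec_scoring s out) := by unfold Spec_scoring; infer_instance

-- ===== CLAIM (what is proved, stated in full; the proofs are below) =====
def Claim_equal_scoring : Prop := ∀ (s : String), Dom_scoring s → Spec_scoring s (scoring s)

-- ===== LEMMAS AND PROOFS =====

-- folding A's step over a run of k 'O's advances the streak by k and adds the triangular sum
theorem fold_replicate_O (k : Nat) (rest : List Char) (cn t : Int) :
    List.foldl scoringStep (cn, t) (List.replicate k 'O' ++ rest)
      = List.foldl scoringStep (cn + k, t + k * cn + k * (k + 1) / 2) rest := by
  induction k generalizing cn t with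
  | zero => simp
  | succ k ih =>
    rw [List.replicate_succ, List.cons_append, List.foldl_cons]
    simp only [scoringStep, beq_self_eq_true, if_pos]
    rw [ih]
    congr 1
    have h1 : cn + 1 + (k : Int) = cn + (k + 1 : Nat) := by push_cast; ring
    have h2 : t + (cn + 1) + k * (cn + 1) + k * (k + 1) / 2
        = t + ((k : Int) + 1) * cn + ((k : Int) + 1) * ((k : Int) + 1 + 1) / 2 := by
      have hg : ((k : Int) + 1) * ((k : Int) + 1 + 1) = (k : Int) * ((k : Int) + 1) + 2 * ((k : Int) + 1) := by ring
      have e1 : (k : Int) * (cn + 1) = (k : Int) * cn + (k : Int) := by ring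
      have e2 : ((k : Int) + 1) * cn = (k : Int) * cn + cn := by ring
      omega
    rw [Prod.ext_iff]; constructor
    · exact h1
    · simpa [Nat.cast_succ] using h2

theorem fold_eq_runs (n : Nat) : ∀ (l : List Char), l.length ≤ n → ∀ t : Int,
    (List.foldl scoringStep (0, t) l).2 = t + scoringRuns l := by
  induction n with
  | zero => intro l hl t; simp_all [List.length_eq_zero_iff.mp (Nat.le_zero.mp hl), scoringRuns]
  | succ n ih =>
    intro l hl t
    match l with
    | [] => simp [scoringRuns]
    | c :: cs =>
      by_cases hc : c = 'O'
      · subst hc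
        rw [scoringRuns]
        simp only [beq_self_eq_true, if_pos]
        have hsplit : ('O' :: cs)
            = List.replicate (('O' :: cs).takeWhile (· == 'O')).length 'O'
              ++ ('O' :: cs).dropWhile (· == 'O') := by
          conv_lhs => rw [← List.takeWhile_append_dropWhile (p := (· == 'O')) (l := 'O' :: cs)]
          congr 1
          apply List.eq_replicate_of_mem
          intro b hb
          have := List.mem_takeWhile_imp hb
          simpa using this
        have hdrop : ∀ d ∈ (('O' :: cs).dropWhile (· == 'O')).head?, ¬ (d == 'O') = true := by
          intro d hd
          have := List.head_dropWhile_not (p := (· == 'O')) (l := 'O' :: cs)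
          rcases hres : ('O' :: cs).dropWhile (· == 'O') with _ | ⟨e, es⟩
          · rw [hres] at hd; simp at hd
          · rw [hres] at hd this; simp at hd; subst hd; simpa using this (by simp)
        generalize hk : (('O' :: cs).takeWhile (· == 'O')).length = k at *
        generalize hrest : ('O' :: cs).dropWhile (· == 'O') = rest at *
        have hlenrun : k + rest.length = cs.length + 1 := by
          have := congrArg List.length hsplit
          simpa using this.symm
        rw [hsplit, fold_replicate_O]
        have hkpos : 0 < k := by
          rw [← hk]; simp
        have hrestlen : rest.length ≤ n := by
          have h1 : ('O' :: cs).length ≤ n + 1 := hl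
          simp only [List.length_cons] at h1
          omega
        match rest, hdrop, hlenrun, hrestlen with
        | [], _, hlenrun, _ =>
          rw [scoringRuns]
          simp only [List.foldl_nil]
          ring_nf
        | d :: ds, hdrop, hlenrun, hrestlen =>
          have hd : ¬ (d == 'O') = true := hdrop d (by simp)
          rw [List.foldl_cons]
          simp only [scoringStep, hd, if_neg, Bool.false_eq_true, not_false_iff]
          have hds : ds.length ≤ n := by simp at hrestlen; omega
          rw [ih ds hds]
          rw [scoringRuns]
          simp only [hd, if_neg, Bool.false_eq_true, not_false_iff]
          ring_nf
      · rw [List.foldl_cons]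
        have hcb : ¬ (c == 'O') = true := by simpa using hc
        simp only [scoringStep, hcb, if_neg, Bool.false_eq_true, not_false_iff]
        have hcs : cs.length ≤ n := by simp at hl; omega
        rw [ih cs hcs, scoringRuns]
        simp [hcb]

-- ===== VERDICT (by name: the statement is the Claim_ definition above) =====
theorem scoring_spec : Claim_equal_scoring := by
  intro s _
  unfold Spec_scoring scoring scoring_alt
  have := fold_eq_runs s.toList.length s.toList (le_refl _) 0
  simpa using this
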